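-- pv_equiv track=rewrite | github.com/paiml/depyler | examples/hard_dict_counter_ops.py | counter_total
-- ===== SOURCE A (Python) =====
-- def counter_total(freq: dict[int, int], candidates: list[int]) -> int:
--     total: int = 0
--     i: int = 0
--     while i < len(candidates):
--         c: int = candidates[i]
--         if c in freq:
--             total = total + freq[c]
--         i = i + 1
--     return total
-- ===== SOURCE B (Python) =====
-- def counter_total(freq: dict[int, int], candidates: list[int]) -> int:
--     counts: dict[int, int] = {}
--     for c in candidates:
--         counts[c] = counts.get(c, 0) + 1
--     total: int = 0
--     for v, n in counts.items():
--         if v in freq: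
--             total = total + freq[v] * n
--     return total
-- ===== Notes on version B (the rewrite author's own statement) =====
-- stated objective: alternative
-- what changed: B first builds a multiplicity table (Counter-style dict) of the candidates and then makes one pass over the distinct values, adding freq[v] * count, instead of A's index-while loop over the raw list; duplicate contributions are preserved via the count factor.
import Mathlib
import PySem

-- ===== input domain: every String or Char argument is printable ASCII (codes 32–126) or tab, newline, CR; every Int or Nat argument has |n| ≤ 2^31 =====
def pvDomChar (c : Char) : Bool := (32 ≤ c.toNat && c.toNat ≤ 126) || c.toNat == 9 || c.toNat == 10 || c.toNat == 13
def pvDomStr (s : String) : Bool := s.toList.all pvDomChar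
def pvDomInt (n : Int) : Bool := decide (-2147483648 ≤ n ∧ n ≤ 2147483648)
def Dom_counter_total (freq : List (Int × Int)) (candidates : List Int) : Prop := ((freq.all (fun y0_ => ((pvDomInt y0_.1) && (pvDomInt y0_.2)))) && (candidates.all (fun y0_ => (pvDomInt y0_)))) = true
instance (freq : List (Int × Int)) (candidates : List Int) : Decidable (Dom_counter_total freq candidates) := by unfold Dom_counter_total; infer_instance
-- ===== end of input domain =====

-- B builds a Counter of the candidates, then sums freq[v] * multiplicity over the distinct
-- values, instead of A's index-while loop over the raw candidate list (objective: alternative).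

-- ===== PORT A =====
-- while i < len(candidates): c = candidates[i]; if c in freq: total += freq[c]; i += 1
def counter_total (freq : List (Int × Int)) (candidates : List Int) : Int :=
  (PySem.List.pyRange 0 (candidates.length : Int) 1).foldl
    (fun total i =>
      let c := PySem.List.pyGetD candidates i 0
      if (PySem.Dict.mk freq).contains c then
        total + (PySem.Dict.mk freq).getD c 0
      else total) 0

-- ===== PORT B =====
-- counts[c] = counts.get(c, 0) + 1 for each candidate; then one pass over counts.items()
def counter_total_alt (freq : List (Int × Int)) (candidates : List Int) : Int :=
  let counts : PySem.Dict Int Int :=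
    candidates.foldl (fun d c => d.insert c (d.getD c 0 + 1)) PySem.Dict.empty
  counts.items.foldl
    (fun total p =>
      if (PySem.Dict.mk freq).contains p.1 then
        total + (PySem.Dict.mk freq).getD p.1 0 * p.2
      else total) 0

-- ===== PRECONDITION & SPEC =====
def Spec_counter_total (freq : List (Int × Int)) (candidates : List Int) (out : Int) : Prop := out = counter_total_alt freq candidates
instance (freq : List (Int × Int)) (candidates : List Int) (out : Int) : Decidable (Spec_counter_total freq candidates out) := by unfold Spec_counter_total; infer_instance

-- ===== CLAIM (what is proved, stated in full; the proofs are below) =====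
def Claim_equal_counter_total : Prop := ∀ (freq : List (Int × Int)) (candidates : List Int), Dom_counter_total freq candidates → Spec_counter_total freq candidates (counter_total freq candidates)

-- ===== LEMMAS AND PROOFS =====

-- the per-candidate contribution both programs add (0 when the key is absent)
def pvG (freq : List (Int × Int)) (c : Int) : Int :=
  if (PySem.Dict.mk freq).contains c then (PySem.Dict.mk freq).getD c 0 else 0

theorem pv_sum_ite_zero (g : Int → Int) (c : Int) :
    ∀ K : List Int, c ∉ K → (K.map (fun k => if k = c then g k else 0)).sum = 0 := by
  intro K
  induction K with
  | nil => intro _; simp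
  | cons k K ih =>
    intro h
    have hk : k ≠ c := fun e => h (e ▸ List.mem_cons_self)
    simp [hk, ih (fun m => h (List.mem_cons_of_mem _ m))]

theorem pv_sum_ite_single (g : Int → Int) (c : Int) :
    ∀ K : List Int, K.Nodup → c ∈ K → (K.map (fun k => if k = c then g k else 0)).sum = g c := by
  intro K
  induction K with
  | nil => intro _ h; cases h
  | cons k K ih =>
    intro hnd hm
    rcases List.mem_cons.mp hm with rfl | hm'
    · simp [pv_sum_ite_zero g c K (List.nodup_cons.mp hnd).1]
    · have hk : k ≠ c := by
        rintro rfl; exact (List.nodup_cons.mp hnd).1 hm'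
      simp [hk, ih (List.nodup_cons.mp hnd).2 hm']

theorem pv_count_sum (g : Int → Int) (K : List Int) (hK : K.Nodup) :
    ∀ l : List Int, (∀ c ∈ l, c ∈ K) →
      (K.map (fun k => g k * l.count k)).sum = (l.map g).sum := by
  intro l
  induction l with
  | nil => intro _; simp
  | cons c rest ih =>
    intro hsub
    have hc : c ∈ K := hsub c List.mem_cons_self
    have hrest := ih (fun x hx => hsub x (List.mem_cons_of_mem _ hx))
    have hsplit :
        (K.map (fun k => g k * (c :: rest).count k)).sum
          = (K.map (fun k => g k * rest.count k)).sum
            + (K.map (fun k => if k = c then g k else 0)).sum := by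
      rw [← List.sum_map_add]
      refine congrArg List.sum (List.map_congr_left ?_)
      intro k _
      rcases eq_or_ne k c with rfl | hkc
      · simp; ring
      · simp [hkc, Ne.symm hkc]
    rw [hsplit, hrest, pv_sum_ite_single g c K hK hc]
    simp [add_comm]

theorem counter_total_eq_sum (freq : List (Int × Int)) (candidates : List Int) :
    counter_total freq candidates = (candidates.map (pvG freq)).sum := by
  unfold counter_total
  rw [PySem.List.foldl_pyRange_zero_pyGetD' candidates 0
        (fun total c => if (PySem.Dict.mk freq).contains c then
          total + (PySem.Dict.mk freq).getD c 0 else total) 0]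
  have : ∀ (l : List Int) (init : Int),
      l.foldl (fun total c => if (PySem.Dict.mk freq).contains c then
          total + (PySem.Dict.mk freq).getD c 0 else total) init
        = init + (l.map (pvG freq)).sum := by
    intro l
    induction l with
    | nil => intro init; simp
    | cons c rest ih =>
      intro init
      rw [List.foldl_cons, ih]
      unfold pvG
      by_cases h : (PySem.Dict.mk freq).contains c = true
      · simp only [h, if_true, List.map_cons, List.sum_cons]; ring
      · rw [Bool.not_eq_true] at h
        simp only [h, Bool.false_eq_true, if_false, List.map_cons, List.sum_cons]; ring
  simpa using this candidates 0

theorem counter_total_alt_eq_sum (freq : List (Int × Int)) (candidates : List Int) :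
    counter_total_alt freq candidates
      = ((PySem.Set.ofList candidates).map
          (fun k => pvG freq k * candidates.count k)).sum := by
  simp only [counter_total_alt, PySem.Dict.foldl_insert_getD_add_one_eq_counter,
    PySem.Dict.items_counter]
  have : ∀ (K : List Int) (init : Int),
      ((K.map (fun k => (k, (candidates.count k : Int)))).foldl
        (fun total p => if (PySem.Dict.mk freq).contains p.1 then
          total + (PySem.Dict.mk freq).getD p.1 0 * p.2 else total) init)
        = init + (K.map (fun k => pvG freq k * candidates.count k)).sum := by
    intro K
    induction K with
    | nil => intro init; simp
    | cons k K ih =>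
      intro init
      rw [List.map_cons, List.foldl_cons, ih]
      unfold pvG
      by_cases h : (PySem.Dict.mk freq).contains k = true
      · simp only [h, if_true, List.map_cons, List.sum_cons]; ring
      · rw [Bool.not_eq_true] at h
        simp only [h, Bool.false_eq_true, if_false, List.map_cons, List.sum_cons]; ring
  simpa using this (PySem.Set.ofList candidates) 0

-- ===== VERDICT (by name: the statement is the Claim_ definition above) =====
theorem counter_total_spec : Claim_equal_counter_total := by
  intro freq candidates _
  unfold Spec_counter_total
  rw [counter_total_eq_sum, counter_total_alt_eq_sum]
  exact (pv_count_sum (pvG freq) (PySem.Set.ofList candidates)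
      (PySem.Set.nodup_ofList candidates)
      candidates (fun c hc => (PySem.Set.mem_ofList candidates c).mpr hc)).symm
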